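-- pv_equiv track=rewrite | github.com/albertrw83/Paragon-Mobile | tracker/constructors.py | generate_site_id_copy_name
-- ===== SOURCE A (Python) =====
-- def generate_site_id_copy_name(name, existing_site_ids, copy_number=1):
--     # if not request.user.is_authenticated:
--     #     return render(request, "jobs/login.html", {"message": None})
--     if copy_number == 1:
--         new_site_id = f'{name} copy'
--     else:
--         new_site_id = f'{name} copy {copy_number}'
--
--     if new_site_id in existing_site_ids:
--         return generate_site_id_copy_name(name, existing_site_ids, copy_number + 1)
--     return new_site_id
-- ===== SOURCE B (Python) =====
-- def generate_site_id_copy_name(name, existing_site_ids, copy_number=1):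
--     # Bounded for-loop over a set: among len+1 consecutive candidates the
--     # suffixes are pairwise distinct, so one of them must be free.
--     taken = set(existing_site_ids)
--     for k in range(len(existing_site_ids) + 1):
--         c = copy_number + k
--         candidate = f'{name} copy' if c == 1 else f'{name} copy {c}'
--         if candidate not in taken:
--             return candidate
-- ===== Notes on version B (the rewrite author's own statement) =====
-- stated objective: alternative
-- what changed: Replaces the unbounded tail recursion (each step re-scanning the list) by a bounded for-loop over at most len+1 candidate names checked against a set built once; trades set construction up front for cheaper per-collision checks.
import Mathlib
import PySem

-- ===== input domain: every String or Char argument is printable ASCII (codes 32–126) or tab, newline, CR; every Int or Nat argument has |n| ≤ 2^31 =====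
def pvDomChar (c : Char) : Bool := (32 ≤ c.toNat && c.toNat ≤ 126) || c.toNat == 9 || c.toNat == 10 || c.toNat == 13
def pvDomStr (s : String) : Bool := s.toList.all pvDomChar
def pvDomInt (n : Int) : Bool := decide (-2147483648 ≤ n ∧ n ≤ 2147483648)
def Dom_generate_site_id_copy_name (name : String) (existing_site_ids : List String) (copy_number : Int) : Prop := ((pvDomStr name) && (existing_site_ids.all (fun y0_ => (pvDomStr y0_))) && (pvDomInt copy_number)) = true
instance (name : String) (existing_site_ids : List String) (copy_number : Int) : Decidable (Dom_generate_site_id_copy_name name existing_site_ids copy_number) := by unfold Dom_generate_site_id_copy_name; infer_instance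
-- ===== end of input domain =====

-- ===== PORT A =====
-- A recurses, incrementing copy_number, until the candidate name is free.  The recursion
-- is made structural with a fuel of length+1: length+1 consecutive candidates are pairwise
-- distinct strings, so they cannot all be members of a length-element list and the fuel-0
-- branch is unreachable (a totality guard only, not an algorithm switch).
def pvGoA (name : String) (existing_site_ids : List String) : Nat → Int → String
  | 0, _ => ""
  | fuel+1, copy_number =>
    let new_site_id := if copy_number == 1 then name ++ " copy"
                       else name ++ " copy " ++ PySem.Int.toStr copy_number
    if new_site_id ∈ existing_site_ids then
      pvGoA name existing_site_ids fuel (copy_number + 1)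
    else new_site_id

def generate_site_id_copy_name (name : String) (existing_site_ids : List String) (copy_number : Int) : String :=
  pvGoA name existing_site_ids (existing_site_ids.length + 1) copy_number

-- ===== PORT B =====
-- B: build the set once, then a bounded for-loop over k in range(len+1), returning the
-- first free candidate (the for-loop with early return is List.findSome? over the range;
-- falling off the loop is unreachable for the same pigeonhole reason).
def generate_site_id_copy_name_alt (name : String) (existing_site_ids : List String) (copy_number : Int) : String :=
  let taken := PySem.Set.ofList existing_site_ids
  match (List.range (existing_site_ids.length + 1)).findSome? (fun (k : Nat) =>
      let c := copy_number + (k : Int)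
      let candidate := if c == 1 then name ++ " copy"
                       else name ++ " copy " ++ PySem.Int.toStr c
      if PySem.Set.contains taken candidate then none else some candidate) with
  | some s => s
  | none => ""

-- ===== PRECONDITION & SPEC =====
def Spec_generate_site_id_copy_name (name : String) (existing_site_ids : List String) (copy_number : Int) (out : String) : Prop := out = generate_site_id_copy_name_alt name existing_site_ids copy_number
instance (name : String) (existing_site_ids : List String) (copy_number : Int) (out : String) : Decidable (Spec_generate_site_id_copy_name name existing_site_ids copy_number out) := by unfold Spec_generate_site_id_copy_name; infer_instance

-- ===== CLAIM (what is proved, stated in full; the proofs are below) =====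
def Claim_equal_generate_site_id_copy_name : Prop := ∀ (name : String) (existing_site_ids : List String) (copy_number : Int), Dom_generate_site_id_copy_name name existing_site_ids copy_number → Spec_generate_site_id_copy_name name existing_site_ids copy_number (generate_site_id_copy_name name existing_site_ids copy_number)

-- ===== LEMMAS AND PROOFS =====
-- The candidate tested by B at index k, as a function of the start counter.
def pvF (name : String) (existing_site_ids : List String) (copy_number : Int) (k : Nat) : Option String :=
  let c := copy_number + (k : Int)
  let candidate := if c == 1 then name ++ " copy"
                   else name ++ " copy " ++ PySem.Int.toStr c
  if PySem.Set.contains (PySem.Set.ofList existing_site_ids) candidate then none else some candidate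

lemma pvF_succ (name : String) (ids : List String) (c : Int) :
    (fun k => pvF name ids c (Nat.succ k)) = pvF name ids (c + 1) := by
  funext k
  simp only [pvF]
  have h : c + ((Nat.succ k : Nat) : Int) = c + 1 + (k : Int) := by push_cast; ring
  rw [h]

lemma pvGoA_eq_findSome? (name : String) (ids : List String) :
    ∀ (fuel : Nat) (c : Int),
      pvGoA name ids fuel c =
        match (List.range fuel).findSome? (pvF name ids c) with
        | some s => s
        | none => "" := by
  intro fuel
  induction fuel with
  | zero => intro c; simp [pvGoA]
  | succ n ih =>
    intro c
    rw [List.range_succ_eq_map, List.findSome?_cons]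
    have hmem : PySem.Set.contains (PySem.Set.ofList ids)
        (if c == 1 then name ++ " copy" else name ++ " copy " ++ PySem.Int.toStr c)
        = decide ((if c == 1 then name ++ " copy" else name ++ " copy " ++ PySem.Int.toStr c) ∈ ids) := by
      simp [PySem.Set.contains, PySem.Set.mem_ofList]
    have hF0 : pvF name ids c 0 =
        if (if c == 1 then name ++ " copy" else name ++ " copy " ++ PySem.Int.toStr c) ∈ ids
        then none
        else some (if c == 1 then name ++ " copy" else name ++ " copy " ++ PySem.Int.toStr c) := by
      simp only [pvF, Nat.cast_zero, Int.add_zero, hmem]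
      by_cases h : (if c == 1 then name ++ " copy" else name ++ " copy " ++ PySem.Int.toStr c) ∈ ids <;>
        simp [h]
    by_cases h : (if c == 1 then name ++ " copy" else name ++ " copy " ++ PySem.Int.toStr c) ∈ ids
    · rw [hF0, if_pos h]
      show pvGoA name ids (n+1) c = _
      simp only [pvGoA, if_pos h]
      rw [ih (c + 1), List.findSome?_map]
      have : (pvF name ids c ∘ Nat.succ) = pvF name ids (c + 1) := pvF_succ name ids c
      rw [this]
    · rw [hF0, if_neg h]
      simp only [pvGoA, if_neg h]
theorem generate_site_id_copy_name_spec : Claim_equal_generate_site_id_copy_name := by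
  intro name ids cn _
  show generate_site_id_copy_name name ids cn = generate_site_id_copy_name_alt name ids cn
  rw [generate_site_id_copy_name, generate_site_id_copy_name_alt, pvGoA_eq_findSome?]
  rfl
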